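-- pv_equiv track=rewrite | github.com/Timosbonus/AdventOfCode | 2024/DayTwo.py | checkIncreaseTwo
-- ===== SOURCE A (Python) =====
-- def checkIncrease(nums):
--     for i in range(len(nums) - 1):
--         if nums[i + 1] <= nums[i] or nums[i + 1] - nums[i] > 3:
--             return False
--     return True
--
-- def checkIncreaseTwo(nums):
--     nums = nums[:]
--     if checkIncrease(nums) == True:
--         return True
--     else:
--         for i in range(len(nums) - 1):
--             if nums[i] >= nums[i + 1] or nums[i + 1] - nums[i] > 3:
--                 if checkIncrease(nums[:i] + nums[i + 1:]) or len(nums) - i - 2 >= 0 and checkIncrease(nums[:i + 1] + nums[i + 2:]):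
--                     return True
--                 break
--
--     return False
-- ===== SOURCE B (Python) =====
-- def checkIncreaseTwo(nums):
--     def ok(seq):
--         return all(0 < b - a <= 3 for a, b in zip(seq, seq[1:]))
--     if ok(nums):
--         return True
--     return any(ok(nums[:i] + nums[i + 1:]) for i in range(len(nums)))
-- ===== Notes on version B (the rewrite author's own statement) =====
-- stated objective: simpler
-- what changed: B is a brute-force dampener: a zip-based ok() predicate plus trying the removal of every single index, replacing A's greedy first-violation scan that probes only the two adjacent removals.
import Mathlib
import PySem

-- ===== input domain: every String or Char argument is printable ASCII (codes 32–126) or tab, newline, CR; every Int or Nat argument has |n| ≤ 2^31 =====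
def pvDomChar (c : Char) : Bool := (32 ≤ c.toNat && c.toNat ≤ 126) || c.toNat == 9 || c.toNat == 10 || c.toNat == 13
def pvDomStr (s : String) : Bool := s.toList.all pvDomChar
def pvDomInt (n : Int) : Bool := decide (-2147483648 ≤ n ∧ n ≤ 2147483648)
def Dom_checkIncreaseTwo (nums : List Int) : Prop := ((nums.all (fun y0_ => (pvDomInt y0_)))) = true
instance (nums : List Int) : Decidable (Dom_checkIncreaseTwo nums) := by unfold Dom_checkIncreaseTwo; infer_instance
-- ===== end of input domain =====

-- B replaces A's greedy first-violation repair (probing only the two adjacent removals) by a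
-- brute-force dampener: a zip-based all() step predicate plus trying the removal of every index
-- (objective: simpler).

-- ===== PORT A =====
-- helper checkIncrease: the index loop over range(len(nums)-1) comparing nums[i], nums[i+1]
-- is transcribed as structural recursion over adjacent pairs (same pairs, same order, early False).
def checkIncrease : List Int → Bool
  | a :: b :: rest =>
      if b ≤ a ∨ b - a > 3 then false else checkIncrease (b :: rest)
  | _ => true

-- A's second loop: walks the pairs carrying the running index i (suffix = nums.drop i);
-- at the first bad pair it returns the Python disjunction and stops ('return … / break → False').
-- nums[:i] + nums[i+1:] = take i ++ drop (i+1) exactly, since 0 ≤ i.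
def loopA (nums : List Int) : Nat → List Int → Bool
  | i, a :: b :: _rest =>
      if a ≥ b ∨ b - a > 3 then
        checkIncrease (nums.take i ++ nums.drop (i + 1)) ||
          (decide ((nums.length : Int) - (i : Int) - 2 ≥ 0) &&
            checkIncrease (nums.take (i + 1) ++ nums.drop (i + 2)))
      else loopA nums (i + 1) (b :: _rest)
  | _, _ => false

def checkIncreaseTwo (nums : List Int) : Bool :=
  -- 'nums = nums[:]' copies the list (no observable effect on the return value)
  if checkIncrease nums == true then true else loopA nums 0 nums

-- ===== PORT B =====
-- ok(seq): all(0 < b - a <= 3 for a, b in zip(seq, seq[1:])); seq[1:] = tail for a list.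
def okAlt (seq : List Int) : Bool :=
  (seq.zip seq.tail).all fun p => decide (0 < p.2 - p.1) && decide (p.2 - p.1 ≤ 3)

def checkIncreaseTwo_alt (nums : List Int) : Bool :=
  if okAlt nums then true
  else (List.range nums.length).any fun i => okAlt (nums.take i ++ nums.drop (i + 1))

-- ===== PRECONDITION & SPEC =====
def Spec_checkIncreaseTwo (nums : List Int) (out : Bool) : Prop := out = checkIncreaseTwo_alt nums
instance (nums : List Int) (out : Bool) : Decidable (Spec_checkIncreaseTwo nums out) := by unfold Spec_checkIncreaseTwo; infer_instance

-- ===== CLAIM (what is proved, stated in full; the proofs are below) =====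
def Claim_equal_checkIncreaseTwo : Prop := ∀ (nums : List Int), Dom_checkIncreaseTwo nums → Spec_checkIncreaseTwo nums (checkIncreaseTwo nums)

-- ===== LEMMAS AND PROOFS =====

lemma chk_cons2 (a b : Int) (r : List Int) :
    checkIncrease (a :: b :: r) = if b ≤ a ∨ b - a > 3 then false else checkIncrease (b :: r) := rfl

lemma loopA_cons2 (nums : List Int) (i : Nat) (a b : Int) (r : List Int) :
    loopA nums i (a :: b :: r) =
      if a ≥ b ∨ b - a > 3 then
        checkIncrease (nums.take i ++ nums.drop (i + 1)) ||
          (decide ((nums.length : Int) - (i : Int) - 2 ≥ 0) &&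
            checkIncrease (nums.take (i + 1) ++ nums.drop (i + 2)))
      else loopA nums (i + 1) (b :: r) := rfl

-- B's step predicate coincides with A's checkIncrease.
lemma ok_eq_chk : ∀ l : List Int, okAlt l = checkIncrease l
  | [] => rfl
  | [_] => rfl
  | a :: b :: r => by
      show ((decide (0 < b - a) && decide (b - a ≤ 3)) && okAlt (b :: r)) = checkIncrease (a :: b :: r)
      rw [ok_eq_chk (b :: r), chk_cons2]
      by_cases h : b ≤ a ∨ b - a > 3
      · rw [if_pos h]
        rcases h with h | h
        · rw [decide_eq_false (by omega : ¬ (0 < b - a))]; simp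
        · rw [decide_eq_false (by omega : ¬ (b - a ≤ 3))]; simp
      · rw [if_neg h]
        rw [decide_eq_true (by omega : 0 < b - a), decide_eq_true (by omega : b - a ≤ 3)]
        simp

-- a list containing a bad adjacent pair fails checkIncrease
lemma chk_bad : ∀ (u : List Int) (a b : Int) (v : List Int), (b ≤ a ∨ 3 < b - a) →
    checkIncrease (u ++ a :: b :: v) = false
  | [], a, b, v, h => by simp only [List.nil_append, chk_cons2]; rw [if_pos h]
  | x :: u, a, b, v, h => by
      have ih := chk_bad u a b v h
      cases hu : u ++ a :: b :: v with
      | nil => simp at hu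
      | cons y t =>
        simp only [List.cons_append, hu, chk_cons2]
        split
        · rfl
        · rw [← hu]; exact ih

-- a failing list decomposes at its FIRST bad pair
lemma chk_decomp : ∀ l : List Int, checkIncrease l = false →
    ∃ pre a b suf, l = pre ++ a :: b :: suf ∧ checkIncrease (pre ++ [a]) = true ∧
      (b ≤ a ∨ 3 < b - a)
  | [] => by intro h; simp [checkIncrease] at h
  | [x] => by intro h; simp [checkIncrease] at h
  | x :: y :: r => by
      intro h
      by_cases hb : y ≤ x ∨ 3 < y - x
      · exact ⟨[], x, y, r, rfl, rfl, hb⟩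
      · have h' : checkIncrease (y :: r) = false := by
          rw [chk_cons2, if_neg (by omega : ¬ (y ≤ x ∨ y - x > 3))] at h
          exact h
        obtain ⟨pre, a, b, suf, hl, hpre, hbad⟩ := chk_decomp (y :: r) h'
        refine ⟨x :: pre, a, b, suf, by simp [hl], ?_, hbad⟩
        cases pre with
        | nil =>
          simp only [List.nil_append] at hl
          injection hl with h1 h2
          subst h1
          simp only [List.cons_append, List.nil_append, chk_cons2]
          rw [if_neg (by omega : ¬ (y ≤ x ∨ y - x > 3))]
          rfl
        | cons p pre' =>
          simp only [List.cons_append] at hl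
          injection hl with h1 h2
          subst h1
          simp only [List.cons_append, chk_cons2]
          rw [if_neg (by omega : ¬ (y ≤ x ∨ y - x > 3))]
          simpa using hpre

-- loopA walks unchanged through a good prefix
lemma loop_walk : ∀ (pre : List Int) (nums : List Int) (i : Nat) (a : Int) (suf : List Int),
    nums.drop i = pre ++ a :: suf → checkIncrease (pre ++ [a]) = true →
    loopA nums i (pre ++ a :: suf) = loopA nums (i + pre.length) (a :: suf)
  | [], nums, i, a, suf, _, _ => by simp
  | x :: pre', nums, i, a, suf, hdrop, hpre => by
      have hdrop' : nums.drop (i + 1) = pre' ++ a :: suf := by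
        rw [← List.tail_drop, hdrop]; rfl
      cases pre' with
      | nil =>
        have hgood : ¬ (x ≥ a ∨ a - x > 3) := by
          intro hc
          rw [show ([x] ++ [a] : List Int) = [x, a] from rfl, chk_cons2,
            if_pos (by omega : a ≤ x ∨ a - x > 3)] at hpre
          exact Bool.false_ne_true hpre
        rw [show (([x] : List Int) ++ a :: suf) = x :: a :: suf from rfl, loopA_cons2, if_neg hgood]
        simp
      | cons y pre'' =>
        have hgood : ¬ (x ≥ y ∨ y - x > 3) := by
          intro hc
          rw [show ((x :: y :: pre'') ++ [a] : List Int) = x :: y :: (pre'' ++ [a]) from rfl,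
            chk_cons2, if_pos (by omega : y ≤ x ∨ y - x > 3)] at hpre
          exact Bool.false_ne_true hpre
        have hpre' : checkIncrease ((y :: pre'') ++ [a]) = true := by
          rw [show ((x :: y :: pre'') ++ [a] : List Int) = x :: y :: (pre'' ++ [a]) from rfl,
            chk_cons2, if_neg (by omega : ¬ (y ≤ x ∨ y - x > 3))] at hpre
          exact hpre
        have ih := loop_walk (y :: pre'') nums (i + 1) a suf hdrop' hpre'
        rw [show ((x :: y :: pre'') ++ a :: suf : List Int) = x :: y :: (pre'' ++ a :: suf) from rfl,
          loopA_cons2, if_neg hgood]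
        rw [show (y :: (pre'' ++ a :: suf) : List Int) = (y :: pre'') ++ a :: suf from rfl, ih]
        simp only [List.length_cons]
        ring_nf

-- ===== VERDICT (by name: the statement is the Claim_ definition above) =====
theorem checkIncreaseTwo_spec : Claim_equal_checkIncreaseTwo := by
  intro nums _hdom
  unfold Spec_checkIncreaseTwo checkIncreaseTwo checkIncreaseTwo_alt
  simp only [ok_eq_chk, beq_iff_eq]
  by_cases h : checkIncrease nums = true
  · simp [h]
  · have h' : checkIncrease nums = false := by simpa using h
    simp only [h', if_false, Bool.false_eq_true]
    obtain ⟨pre, a, b, suf, hl, hpre, hbad⟩ := chk_decomp nums h'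
    have hdrop0 : nums.drop 0 = pre ++ a :: b :: suf := by simpa using hl
    have hwalk := loop_walk pre nums 0 a (b :: suf) hdrop0 hpre
    have hlen : nums.length = pre.length + 2 + suf.length := by
      rw [hl]; simp [List.length_append]; omega
    have hcond : ((nums.length : Int) - ((0 + pre.length : Nat) : Int) - 2 ≥ 0) := by
      rw [hlen]; push_cast; omega
    have hE : ∀ j : Nat, nums.take j ++ nums.drop (j + 1) = nums.eraseIdx j :=
      fun j => (List.eraseIdx_eq_take_drop_succ nums j).symm
    have hloop : loopA nums 0 nums =
        (checkIncrease (nums.eraseIdx (pre.length)) || checkIncrease (nums.eraseIdx (pre.length + 1))) := by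
      have e1 : loopA nums 0 nums = loopA nums 0 (pre ++ a :: b :: suf) := by rw [← hl]
      rw [e1, hwalk, loopA_cons2, if_pos (hbad : a ≥ b ∨ b - a > 3), decide_eq_true hcond,
        Bool.true_and, Nat.zero_add, hE, hE]
    rw [hloop]
    cases hG : (checkIncrease (nums.eraseIdx pre.length) || checkIncrease (nums.eraseIdx (pre.length + 1))) with
    | true =>
      symm
      rw [List.any_eq_true]
      rcases Bool.or_eq_true_iff.mp hG with hg | hg
      · exact ⟨pre.length, List.mem_range.mpr (by omega), by rw [hE]; exact hg⟩
      · exact ⟨pre.length + 1, List.mem_range.mpr (by omega), by rw [hE]; exact hg⟩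
    | false =>
      symm
      rw [List.any_eq_false]
      intro j hj
      rw [List.mem_range] at hj
      rw [hE]
      obtain ⟨hg1, hg2⟩ := Bool.or_eq_false_iff.mp hG
      rcases Nat.lt_trichotomy j pre.length with hlt | rfl | hgt
      · rw [hl, List.eraseIdx_append_of_lt_length hlt]
        simp [chk_bad _ _ _ _ hbad]
      · simp [hg1]
      · rcases Nat.eq_or_lt_of_le hgt with rfl | hgt2
        · simp [hg2]
        · rw [hl, List.eraseIdx_append_of_length_le (by omega : pre.length ≤ j)]
          obtain ⟨k, hk⟩ : ∃ k, j - pre.length = k + 2 := ⟨j - pre.length - 2, by omega⟩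
          rw [hk]
          simp only [List.eraseIdx]
          simp [chk_bad _ _ _ _ hbad]
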